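-- pv_equiv track=rewrite | github.com/yhyub/coze-studio-test | .agent/skills/workflow-error-automation/scripts/fix-yaml-syntax.py | _fix_duplicate_keys
-- ===== SOURCE A (Python) =====
-- def _fix_duplicate_keys(content):
--     """修复重复键"""
--     # 简单的重复键修复：保留最后一个值
--     lines = content.split('\n')
--     key_lines = {}
--     fixed_lines = []
--
--     for i, line in enumerate(lines):
--         if ':' in line and not line.strip().startswith('#') and not line.strip().startswith('- '):
--             key = line.split(':', 1)[0].strip()
--             if key:
--                 key_lines[key] = i
--
--     # 标记重复键
--     seen_keys = set()
--     for i, line in enumerate(lines):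
--         if ':' in line and not line.strip().startswith('#') and not line.strip().startswith('- '):
--             key = line.split(':', 1)[0].strip()
--             if key and key in seen_keys:
--                 # 添加注释标记重复键
--                 fixed_lines.append(f"# DUPLICATE_KEY: {line}")
--             else:
--                 fixed_lines.append(line)
--                 seen_keys.add(key)
--         else:
--             fixed_lines.append(line)
--
--     return '\n'.join(fixed_lines)
-- ===== SOURCE B (Python) =====
-- def _fix_duplicate_keys(content):
--     """修复重复键"""
--     lines = content.split('\n')
--
--     def key_of(line):
--         # classify a line: its key if it is a key:value line with a non-empty key, else None
--         if ':' in line and not line.strip().startswith('#') and not line.strip().startswith('- '):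
--             k = line.split(':', 1)[0].strip()
--             if k:
--                 return k
--         return None
--
--     out = []
--     for i, line in enumerate(lines):
--         k = key_of(line)
--         if k is not None and any(key_of(prev) == k for prev in lines[:i]):
--             out.append("# DUPLICATE_KEY: " + line)
--         else:
--             out.append(line)
--     return '\n'.join(out)
-- ===== Notes on version B (the rewrite author's own statement) =====
-- stated objective: alternative
-- what changed: B drops A's incrementally grown seen-set (and A's dead key_lines dict) entirely: a key_of classifier maps each line to Optional[key], and a line is commented iff some earlier line (a direct any-scan over lines[:i]) classifies to the same key, trading the stateful single pass for a stateless nested scan.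
import Mathlib
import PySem

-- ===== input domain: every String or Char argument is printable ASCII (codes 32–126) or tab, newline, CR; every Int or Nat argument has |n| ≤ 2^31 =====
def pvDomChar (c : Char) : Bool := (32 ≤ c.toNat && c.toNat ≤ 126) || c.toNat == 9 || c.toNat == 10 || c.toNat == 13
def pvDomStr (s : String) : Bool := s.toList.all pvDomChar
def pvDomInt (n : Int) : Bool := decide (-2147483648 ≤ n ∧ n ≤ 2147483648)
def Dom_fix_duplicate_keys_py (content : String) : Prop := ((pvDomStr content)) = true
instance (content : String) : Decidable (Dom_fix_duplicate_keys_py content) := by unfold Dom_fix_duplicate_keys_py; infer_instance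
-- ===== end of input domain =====

-- B removes A's seen-set (and dead key_lines dict): a key_of classifier plus a direct
-- any-scan over the earlier lines decides duplicates; stateless nested scan, same result.

-- ===== PORT A =====
-- ':' in line and not line.strip().startswith('#') and not line.strip().startswith('- ')
def pvQual (l : List Char) : Bool :=
  PySem.Chars.isIn [':'] l
    && !(PySem.Chars.startswith (PySem.Chars.strip l) ['#'])
    && !(PySem.Chars.startswith (PySem.Chars.strip l) ['-', ' '])

-- line.split(':', 1)[0].strip()
def pvKey (l : List Char) : List Char :=
  PySem.Chars.strip ((PySem.Chars.splitOnMax l [':'] 1).headD [])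

-- body of A's second loop (state = (seen_keys, fixed_lines))
def pvStepA (st : PySem.Set (List Char) × List (List Char)) (p : Int × List Char) :
    PySem.Set (List Char) × List (List Char) :=
  if pvQual p.2 then
    let key := pvKey p.2
    if !key.isEmpty && PySem.Set.contains st.1 key then
      (st.1, st.2 ++ ["# DUPLICATE_KEY: ".toList ++ p.2])
    else
      (PySem.Set.add st.1 key, st.2 ++ [p.2])
  else (st.1, st.2 ++ [p.2])

def fix_duplicate_keys_py (content : String) : String :=
  let lines := PySem.Chars.splitOn content.toList ['\n']
  -- first loop: key_lines[key] = i (built as in A; never read afterwards, as in A)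
  let _key_lines : PySem.Dict (List Char) Int :=
    (PySem.List.enumerate lines).foldl
      (fun d p =>
        if pvQual p.2 then
          (if !(pvKey p.2).isEmpty then d.insert (pvKey p.2) p.1 else d)
        else d)
      PySem.Dict.empty
  let result :=
    (PySem.List.enumerate lines).foldl pvStepA (PySem.Set.empty, [])
  String.ofList (PySem.Chars.join ['\n'] result.2)

-- ===== PORT B =====
-- key_of(line): the key if the line is a key:value line with a non-empty key, else None
def pvKeyOf (line : List Char) : Option (List Char) :=
  if PySem.Chars.isIn [':'] line
      && !(PySem.Chars.startswith (PySem.Chars.strip line) ['#'])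
      && !(PySem.Chars.startswith (PySem.Chars.strip line) ['-', ' ']) then
    let k := PySem.Chars.strip ((PySem.Chars.splitOnMax line [':'] 1).headD [])
    if !k.isEmpty then some k else none
  else none

-- loop body: k = key_of(line); duplicate iff k is not None and any earlier line has key k
def pvMapB (lines : List (List Char)) (p : Int × List Char) : List Char :=
  match pvKeyOf p.2 with
  | some k =>
      if (PySem.List.slice lines none (some p.1)).any (fun prev => pvKeyOf prev == some k) then
        "# DUPLICATE_KEY: ".toList ++ p.2
      else p.2
  | none => p.2

def fix_duplicate_keys_py_alt (content : String) : String :=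
  let lines := PySem.Chars.splitOn content.toList ['\n']
  let out := (PySem.List.enumerate lines).map (pvMapB lines)
  String.ofList (PySem.Chars.join ['\n'] out)

-- ===== PRECONDITION & SPEC =====
def Spec_fix_duplicate_keys_py (content : String) (out : String) : Prop := out = fix_duplicate_keys_py_alt content
instance (content : String) (out : String) : Decidable (Spec_fix_duplicate_keys_py content out) := by unfold Spec_fix_duplicate_keys_py; infer_instance

-- ===== CLAIM =====
def Claim_equal_fix_duplicate_keys_py : Prop := ∀ (content : String), Dom_fix_duplicate_keys_py content → Spec_fix_duplicate_keys_py content (fix_duplicate_keys_py content)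

-- ===== LEMMAS AND PROOFS =====

-- pvKeyOf is pvQual/pvKey's classifier: some k iff the line qualifies with non-empty key k
theorem pvKeyOf_eq (l : List Char) :
    pvKeyOf l = if pvQual l && !(pvKey l).isEmpty then some (pvKey l) else none := by
  simp only [pvKeyOf, pvQual, pvKey]
  by_cases h : (PySem.Chars.isIn [':'] l
      && !(PySem.Chars.startswith (PySem.Chars.strip l) ['#'])
      && !(PySem.Chars.startswith (PySem.Chars.strip l) ['-', ' '])) = true
  · simp [h]
  · simp [h]

-- the main invariant-based induction: processing the suffix with a seen-set that contains
-- exactly the non-empty keys classified in the prefix produces B's per-line map results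
theorem pvMain (lines : List (List Char)) (pre suf : List (List Char))
    (hsplit : lines = pre ++ suf)
    (s : PySem.Set (List Char)) (acc : List (List Char))
    (Inv : ∀ k, ¬ k.isEmpty = true →
      (PySem.Set.contains s k = true ↔ ∃ prev ∈ pre, pvKeyOf prev = some k)) :
    ((PySem.List.enumerate suf (pre.length : Int)).foldl pvStepA (s, acc)).2 =
      acc ++ (PySem.List.enumerate suf (pre.length : Int)).map (pvMapB lines) := by
  induction suf generalizing pre s acc with
  | nil => simp [PySem.List.enumerate_nil]
  | cons l rest ih =>
    rw [PySem.List.enumerate_cons, List.foldl_cons, List.map_cons]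
    have hslice : PySem.List.slice lines none (some (pre.length : Int)) = pre := by
      rw [PySem.List.slice_to_natCast, hsplit, List.take_left]
    have hrec : ∀ (s' : PySem.Set (List Char)),
        (∀ k, ¬ k.isEmpty = true →
          (PySem.Set.contains s' k = true ↔ ∃ prev ∈ pre ++ [l], pvKeyOf prev = some k)) →
        ∀ acc', ((PySem.List.enumerate rest ((pre.length : Int) + 1)).foldl pvStepA (s', acc')).2 =
          acc' ++ (PySem.List.enumerate rest ((pre.length : Int) + 1)).map (pvMapB lines) := by
      intro s' hInv acc'
      have hlen : ((pre ++ [l]).length : Int) = (pre.length : Int) + 1 := by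
        simp
      have := ih (pre ++ [l]) (by simpa using hsplit) s' acc' hInv
      rwa [hlen] at this
    cases hko : pvKeyOf l with
    | some k =>
      -- qualifying line with non-empty key k
      have hq : pvQual l = true := by
        rw [pvKeyOf_eq] at hko
        by_cases h : (pvQual l && !(pvKey l).isEmpty) = true
        · exact (Bool.and_eq_true ..).mp h |>.1
        · simp [h] at hko
      have hkk : pvKey l = k ∧ ¬ (pvKey l).isEmpty = true := by
        rw [pvKeyOf_eq] at hko
        by_cases h : (pvQual l && !(pvKey l).isEmpty) = true
        · refine ⟨by simpa [h] using hko, ?_⟩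
          have := (Bool.and_eq_true ..).mp h |>.2
          simp at this
          simp [this]
        · simp [h] at hko
      obtain ⟨hkeq, hkne⟩ := hkk
      have hkf : (pvKey l).isEmpty = false := by simpa using hkne
      have hkne' : ¬ k.isEmpty = true := by rw [← hkeq]; exact hkne
      have hB : pvMapB lines ((pre.length : Int), l) =
          if pre.any (fun prev => pvKeyOf prev == some k) then
            "# DUPLICATE_KEY: ".toList ++ l
          else l := by
        simp [pvMapB, hko, hslice]
      by_cases hseen : PySem.Set.contains s k = true
      · -- duplicate: both emit the prefixed line, set unchanged
        have hmemA : pvKey l ∈ s := by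
          rw [hkeq]; exact (PySem.Set.contains_iff s k).mp hseen
        have hc : (!(pvKey l).isEmpty && PySem.Set.contains s (pvKey l)) = true := by
          rw [hkf, hkeq, hseen]; rfl
        have hA : pvStepA (s, acc) ((pre.length : Int), l) =
            (s, acc ++ ["# DUPLICATE_KEY: ".toList ++ l]) := by
          simp only [pvStepA, hq, if_true, hc]
        have hany : pre.any (fun prev => pvKeyOf prev == some k) = true := by
          obtain ⟨prev, hmem, hp⟩ := (Inv k hkne').mp hseen
          exact List.any_eq_true.mpr ⟨prev, hmem, by simp [hp]⟩
        rw [hA, hB, if_pos hany]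
        rw [hrec s ?_ (acc ++ ["# DUPLICATE_KEY: ".toList ++ l])]
        · simp
        · intro k' hk'
          rw [Inv k' hk']
          constructor
          · rintro ⟨prev, hmem, hp⟩; exact ⟨prev, by simp [hmem], hp⟩
          · rintro ⟨prev, hmem, hp⟩
            rcases (List.mem_append.mp hmem) with h | h
            · exact ⟨prev, h, hp⟩
            · -- prev = l: then k' = k, already present
              have : prev = l := by simpa using h
              subst this
              rw [hko] at hp
              have hkk' : k' = k := (Option.some_inj.mp hp).symm
              rw [hkk']
              exact (Inv k hkne').mp hseen
      · -- first occurrence: both emit the line; A records the key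
        have hmemA : pvKey l ∉ s := by
          rw [hkeq]
          intro h
          exact hseen ((PySem.Set.contains_iff s k).mpr h)
        have hseenf : PySem.Set.contains s k = false := by simpa using hseen
        have hc : (!(pvKey l).isEmpty && PySem.Set.contains s (pvKey l)) = false := by
          rw [hkf, hkeq, hseenf]; rfl
        have hA : pvStepA (s, acc) ((pre.length : Int), l) =
            (PySem.Set.add s (pvKey l), acc ++ [l]) := by
          simp only [pvStepA, hq, if_true, hc, Bool.false_eq_true, if_false]
        have hany : pre.any (fun prev => pvKeyOf prev == some k) = false := by
          rw [← Bool.not_eq_true]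
          intro h
          obtain ⟨prev, hmem, hp⟩ := List.any_eq_true.mp h
          have hp' : pvKeyOf prev = some k := by simpa using hp
          exact hseen ((Inv k (by rwa [hkeq] at hkne)).mpr ⟨prev, hmem, hp'⟩)
        rw [hA, hB, if_neg (by simp [hany])]
        rw [hrec (PySem.Set.add s (pvKey l)) ?_ (acc ++ [l])]
        · simp
        · intro k' hk'
          rw [PySem.Set.contains_iff, PySem.Set.mem_add, ← PySem.Set.contains_iff]
          constructor
          · rintro (h | h)
            · obtain ⟨prev, hmem, hp⟩ := (Inv k' hk').mp h
              exact ⟨prev, by simp [hmem], hp⟩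
            · subst h
              exact ⟨l, by simp, by rw [hko, hkeq]⟩
          · rintro ⟨prev, hmem, hp⟩
            rcases (List.mem_append.mp hmem) with h | h
            · exact Or.inl ((Inv k' hk').mpr ⟨prev, h, hp⟩)
            · have : prev = l := by simpa using h
              subst this
              rw [hko] at hp
              have hkk' : k' = k := (Option.some_inj.mp hp).symm
              exact Or.inr (hkk'.trans hkeq.symm)
    | none =>
      -- non-qualifying line, or empty key: B passes through
      have hB : pvMapB lines ((pre.length : Int), l) = l := by
        simp [pvMapB, hko]
      have hInv' : ∀ (s' : PySem.Set (List Char)),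
          (∀ k, ¬ k.isEmpty = true → (PySem.Set.contains s' k = true ↔ PySem.Set.contains s k = true)) →
          ∀ k, ¬ k.isEmpty = true →
            (PySem.Set.contains s' k = true ↔ ∃ prev ∈ pre ++ [l], pvKeyOf prev = some k) := by
        intro s' hsame k hk
        rw [hsame k hk, Inv k hk]
        constructor
        · rintro ⟨prev, hmem, hp⟩; exact ⟨prev, by simp [hmem], hp⟩
        · rintro ⟨prev, hmem, hp⟩
          rcases (List.mem_append.mp hmem) with h | h
          · exact ⟨prev, h, hp⟩
          · have : prev = l := by simpa using h
            subst this
            rw [hko] at hp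
            exact absurd hp (by simp)
      by_cases hq : pvQual l = true
      · -- qualifying with empty key: A appends line and adds '' to the set
        have hke : (pvKey l).isEmpty = true := by
          rw [pvKeyOf_eq, hq] at hko
          by_cases h : (pvKey l).isEmpty = true
          · exact h
          · simp [h] at hko
        have hA : pvStepA (s, acc) ((pre.length : Int), l) =
            (PySem.Set.add s (pvKey l), acc ++ [l]) := by
          simp [pvStepA, hq, hke]
        rw [hA, hB]
        rw [hrec (PySem.Set.add s (pvKey l)) (hInv' _ ?_) (acc ++ [l])]
        · simp
        · intro k hk
          rw [PySem.Set.contains_iff, PySem.Set.mem_add, ← PySem.Set.contains_iff]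
          constructor
          · rintro (h | h)
            · exact h
            · subst h
              rw [hke] at hk
              exact absurd rfl hk
          · exact Or.inl
      · have hA : pvStepA (s, acc) ((pre.length : Int), l) = (s, acc ++ [l]) := by
          simp [pvStepA, hq]
        rw [hA, hB]
        rw [hrec s (hInv' _ (fun _ _ => Iff.rfl)) (acc ++ [l])]
        simp

-- ===== VERDICT (by name: the statement is the Claim_ definition above) =====
theorem fix_duplicate_keys_py_spec : Claim_equal_fix_duplicate_keys_py := by
  intro content _
  unfold Spec_fix_duplicate_keys_py
  simp only [fix_duplicate_keys_py, fix_duplicate_keys_py_alt]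
  have := pvMain (PySem.Chars.splitOn content.toList ['\n']) []
    (PySem.Chars.splitOn content.toList ['\n']) rfl PySem.Set.empty []
    (by
      intro k hk
      constructor
      · intro h
        rw [PySem.Set.contains_iff] at h
        simp [PySem.Set.empty] at h
      · rintro ⟨prev, hmem, _⟩
        simp at hmem)
  simp only [List.length_nil, Nat.cast_zero, List.nil_append] at this
  rw [this]
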